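-- pv_equiv track=rewrite | github.com/hstephan23/pr-impact | app/analysis/cycles.py | diff_cycles
-- ===== SOURCE A (Python) =====
-- def _normalize_cycle(cycle: list[str]) -> frozenset[str]:
--     """Normalize a cycle to a frozenset for order-independent comparison."""
--     return frozenset(cycle)
--
-- def diff_cycles(
--     base_cycles: list[list[str]],
--     head_cycles: list[list[str]],
-- ) -> tuple[list[list[str]], list[list[str]]]:
--     """Diff cycles between base and head graphs.
--
--     Args:
--         base_cycles: Cycles detected in the base branch.
--         head_cycles: Cycles detected in the head branch.
--
--     Returns:
--         Tuple of (new_cycles, resolved_cycles):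
--           - new_cycles: Cycles present in head but not in base (introduced by PR)
--           - resolved_cycles: Cycles present in base but not in head (fixed by PR)
--     """
--     base_set = {_normalize_cycle(c) for c in base_cycles}
--     head_set = {_normalize_cycle(c) for c in head_cycles}
--
--     new_frozen = head_set - base_set
--     resolved_frozen = base_set - head_set
--
--     # Convert back to sorted lists for stable output
--     new_cycles = [sorted(c) for c in new_frozen]
--     resolved_cycles = [sorted(c) for c in resolved_frozen]
--
--     # Sort the lists themselves for deterministic ordering
--     new_cycles.sort()
--     resolved_cycles.sort()
--
--     return new_cycles, resolved_cycles
-- ===== SOURCE B (Python) =====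
-- def diff_cycles(base_cycles, head_cycles):
--     # Sort-and-merge instead of set difference: canonicalize each cycle to its
--     # sorted deduplicated vertex list, sort both key lists, then a single
--     # two-pointer merge scan emits (in order, without duplicates) the keys seen
--     # only on one side; the outputs come out already sorted.
--     def key(c):
--         out = []
--         for x in sorted(c):
--             if not out or x != out[-1]:
--                 out.append(x)
--         return out
--
--     bk = sorted(key(c) for c in base_cycles)
--     hk = sorted(key(c) for c in head_cycles)
--     new_cycles = []
--     resolved_cycles = []
--     i, j = 0, 0
--     while i < len(bk) or j < len(hk):
--         if j >= len(hk) or (i < len(bk) and bk[i] < hk[j]):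
--             k = bk[i]
--             resolved_cycles.append(k)
--             while i < len(bk) and bk[i] == k:
--                 i += 1
--         elif i >= len(bk) or hk[j] < bk[i]:
--             k = hk[j]
--             new_cycles.append(k)
--             while j < len(hk) and hk[j] == k:
--                 j += 1
--         else:
--             k = bk[i]
--             while i < len(bk) and bk[i] == k:
--                 i += 1
--             while j < len(hk) and hk[j] == k:
--                 j += 1
--     return new_cycles, resolved_cycles
-- ===== Notes on version B (the rewrite author's own statement) =====
-- stated objective: alternative
-- what changed: Replaces A's two hash sets and two set-difference operations with sort-and-merge: each cycle is canonicalized by sorting and adjacent-duplicate removal, both key lists are sorted, and a single two-pointer merge scan emits the keys present on only one side already in sorted order, so no final sort of the outputs is needed.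
import Mathlib
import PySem

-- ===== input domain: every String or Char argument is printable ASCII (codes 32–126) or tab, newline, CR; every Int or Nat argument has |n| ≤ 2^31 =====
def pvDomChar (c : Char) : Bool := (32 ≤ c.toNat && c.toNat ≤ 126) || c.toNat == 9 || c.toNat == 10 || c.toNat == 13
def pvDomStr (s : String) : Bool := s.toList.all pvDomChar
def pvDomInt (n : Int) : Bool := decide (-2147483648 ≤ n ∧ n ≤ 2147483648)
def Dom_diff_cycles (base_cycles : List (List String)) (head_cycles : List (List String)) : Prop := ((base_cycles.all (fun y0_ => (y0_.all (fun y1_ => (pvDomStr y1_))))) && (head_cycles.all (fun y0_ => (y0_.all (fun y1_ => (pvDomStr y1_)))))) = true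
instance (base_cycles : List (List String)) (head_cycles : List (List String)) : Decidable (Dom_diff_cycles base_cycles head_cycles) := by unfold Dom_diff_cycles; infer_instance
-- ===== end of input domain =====

-- B replaces A's two hash sets and two set differences by sort-and-merge: both key
-- lists are sorted and ONE two-pointer merge scan emits the one-sided keys already
-- in order, so no final sort of the outputs is needed (objective: alternative).

-- ===== PORT A =====
-- frozenset(cycle) is ported as its canonical representative, the sorted list of the
-- distinct elements (exact: frozensets are equal iff their representatives are, and
-- every use A makes of them — set difference and sorted(c) — factors through it).
def pyFrozenset (cycle : List String) : List String :=
  PySem.List.sorted (PySem.Set.ofList cycle) (fun x => x) false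

def diff_cycles (base_cycles : List (List String)) (head_cycles : List (List String)) : List (List String) × List (List String) :=
  let base_set : PySem.Set (List String) := PySem.Set.ofList (base_cycles.map pyFrozenset)
  let head_set : PySem.Set (List String) := PySem.Set.ofList (head_cycles.map pyFrozenset)
  let new_frozen := PySem.Set.diff head_set base_set
  let resolved_frozen := PySem.Set.diff base_set head_set
  -- [sorted(c) for c in s] followed by .sort(): sorted(·) is injective on frozensets,
  -- so the final sorted list does not depend on the set's iteration order
  let new_cycles := @PySem.List.sorted _ _ List.instLinearOrder.toLT LinearOrder.toDecidableLT
    (new_frozen.map (fun c => PySem.List.sorted c (fun x => x) false)) (fun x => x) false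
  let resolved_cycles := @PySem.List.sorted _ _ List.instLinearOrder.toLT LinearOrder.toDecidableLT
    (resolved_frozen.map (fun c => PySem.List.sorted c (fun x => x) false)) (fun x => x) false
  (new_cycles, resolved_cycles)

-- ===== PORT B =====
-- key(c): sorted(c) then one pass keeping each element that differs from the last kept
def normKey (cycle : List String) : List String :=
  (PySem.List.sorted cycle (fun x => x) false).foldl
    (fun out x => if out = [] ∨ out.getLast? ≠ some x then out ++ [x] else out) []

-- the two-pointer merge loop; the inner 'while … == k: i += 1' is a dropWhile
def mergeLoop (bk hk : List (List String)) (newAcc resAcc : List (List String)) :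
    List (List String) × List (List String) :=
  match bk, hk with
  | [], [] => (newAcc, resAcc)
  | b :: bt, [] =>
      mergeLoop (bt.dropWhile (fun x => x == b)) [] newAcc (resAcc ++ [b])
  | [], h :: ht =>
      mergeLoop [] (ht.dropWhile (fun x => x == h)) (newAcc ++ [h]) resAcc
  | b :: bt, h :: ht =>
      if @LT.lt _ List.instLinearOrder.toLT b h then
        mergeLoop (bt.dropWhile (fun x => x == b)) (h :: ht) newAcc (resAcc ++ [b])
      else if @LT.lt _ List.instLinearOrder.toLT h b then
        mergeLoop (b :: bt) (ht.dropWhile (fun x => x == h)) (newAcc ++ [h]) resAcc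
      else
        mergeLoop (bt.dropWhile (fun x => x == b)) (ht.dropWhile (fun x => x == h)) newAcc resAcc
termination_by bk.length + hk.length
decreasing_by
  · have := List.length_dropWhile_le (fun x => x == b) bt; simp; omega
  · have := List.length_dropWhile_le (fun x => x == h) ht; simp; omega
  · have := List.length_dropWhile_le (fun x => x == b) bt; simp; omega
  · have := List.length_dropWhile_le (fun x => x == h) ht; simp; omega
  · have h1 := List.length_dropWhile_le (fun x => x == b) bt
    have h2 := List.length_dropWhile_le (fun x => x == h) ht; simp; omega

def diff_cycles_alt (base_cycles : List (List String)) (head_cycles : List (List String)) : List (List String) × List (List String) :=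
  let bk := @PySem.List.sorted _ _ List.instLinearOrder.toLT LinearOrder.toDecidableLT
    (base_cycles.map normKey) (fun x => x) false
  let hk := @PySem.List.sorted _ _ List.instLinearOrder.toLT LinearOrder.toDecidableLT
    (head_cycles.map normKey) (fun x => x) false
  mergeLoop bk hk [] []

-- ===== PRECONDITION & SPEC =====
def Spec_diff_cycles (base_cycles : List (List String)) (head_cycles : List (List String)) (out : List (List String) × List (List String)) : Prop := out = diff_cycles_alt base_cycles head_cycles
instance (base_cycles : List (List String)) (head_cycles : List (List String)) (out : List (List String) × List (List String)) : Decidable (Spec_diff_cycles base_cycles head_cycles out) := by unfold Spec_diff_cycles; infer_instance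

-- ===== CLAIM =====
def Claim_equal_diff_cycles : Prop := ∀ (base_cycles : List (List String)) (head_cycles : List (List String)), Dom_diff_cycles base_cycles head_cycles → Spec_diff_cycles base_cycles head_cycles (diff_cycles base_cycles head_cycles)

-- ===== LEMMAS AND PROOFS =====

-- two strictly increasing lists with the same members are equal
-- two strictly increasing lists with the same members are equal
theorem sortedLt_ext {T : Type} [LinearOrder T] (l₁ l₂ : List T)
    (h₁ : l₁.Pairwise (· < ·)) (h₂ : l₂.Pairwise (· < ·))
    (hm : ∀ x, x ∈ l₁ ↔ x ∈ l₂) : l₁ = l₂ :=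
  List.Perm.eq_of_pairwise (fun a b _ _ hab hba => le_antisymm hab hba)
    (h₁.imp le_of_lt) (h₂.imp le_of_lt)
    ((List.perm_ext_iff_of_nodup (h₁.imp ne_of_lt) (h₂.imp ne_of_lt)).mpr hm)

theorem dedup_fold_spec (l acc : List String) :
    l.Pairwise (· ≤ ·) → acc.Pairwise (· < ·) → (∀ a ∈ acc, ∀ y ∈ l, a ≤ y) →
    (l.foldl (fun out x => if out = [] ∨ out.getLast? ≠ some x then out ++ [x] else out) acc).Pairwise (· < ·)
      ∧ ∀ x, x ∈ l.foldl (fun out x => if out = [] ∨ out.getLast? ≠ some x then out ++ [x] else out) acc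
          ↔ x ∈ acc ∨ x ∈ l := by
  induction l generalizing acc with
  | nil => exact fun _ hacc _ => ⟨hacc, fun x => by simp⟩
  | cons v t ih =>
    intro hl hacc hle
    have hvt : ∀ z ∈ t, v ≤ z := fun z hz => (List.pairwise_cons.mp hl).1 z hz
    have hlt : t.Pairwise (· ≤ ·) := (List.pairwise_cons.mp hl).2
    simp only [List.foldl_cons]
    by_cases hc : acc = [] ∨ acc.getLast? ≠ some v
    · rw [if_pos hc]
      have hacc' : (acc ++ [v]).Pairwise (· < ·) := by
        rw [List.pairwise_append]
        refine ⟨hacc, List.pairwise_singleton _ _, ?_⟩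
        intro a ha v' hv'
        rw [List.mem_singleton] at hv'
        rw [hv']
        rcases hc with rfl | hc
        · simp at ha
        · have hav : a ≤ v := hle a ha v (by simp)
          by_cases hEq : a = v
          · exfalso
            obtain ⟨pre, m, hpre⟩ := acc.eq_nil_or_concat.resolve_left (by rintro rfl; simp at ha)
            rw [List.concat_eq_append] at hpre
            subst hpre
            have hml : (pre ++ [m]).getLast? = some m := by simp
            have ham : a ≤ m := by
              rcases List.mem_append.mp ha with hb | hb
              · exact le_of_lt ((List.pairwise_append.mp hacc).2.2 a hb m (by simp))
              · simp at hb; subst hb; exact le_rfl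
            have hmv : m ≤ v := hle m (by simp) v (by simp)
            have hmveq : m = v := le_antisymm hmv (hEq ▸ ham)
            exact hc (by rw [hml, hmveq])
          · exact lt_of_le_of_ne hav hEq
      have hle' : ∀ a ∈ acc ++ [v], ∀ z ∈ t, a ≤ z := by
        intro a ha z hz
        rcases List.mem_append.mp ha with ha | ha
        · exact hle a ha z (by simp [hz])
        · simp at ha; subst ha; exact hvt z hz
      obtain ⟨hp, hmem⟩ := ih (acc ++ [v]) hlt hacc' hle'
      refine ⟨hp, fun x => ?_⟩
      rw [hmem x]
      simp [List.mem_append, or_assoc]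
    · rw [if_neg hc]
      push_neg at hc
      have hv : v ∈ acc := List.mem_of_getLast? hc.2
      have hle' : ∀ a ∈ acc, ∀ z ∈ t, a ≤ z := fun a ha z hz => hle a ha z (by simp [hz])
      obtain ⟨hp, hmem⟩ := ih acc hlt hacc hle'
      refine ⟨hp, fun x => ?_⟩
      rw [hmem x]
      constructor
      · rintro (h | h)
        · exact Or.inl h
        · exact Or.inr (by simp [h])
      · rintro (h | h)
        · exact Or.inl h
        · rcases List.mem_cons.mp h with rfl | h
          · exact Or.inl hv
          · exact Or.inr h

theorem normKey_eq_pyFrozenset (c : List String) : normKey c = pyFrozenset c := by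
  have hs : (PySem.List.sorted c (fun x => x) false).Pairwise (· ≤ ·) :=
    PySem.List.sorted_pairwise c (fun x => x)
  obtain ⟨hp, hmem⟩ := dedup_fold_spec (PySem.List.sorted c (fun x => x) false) [] hs
    List.Pairwise.nil (by simp)
  refine sortedLt_ext _ _ hp (PySem.List.sorted_ofList_pairwise_lt c) ?_
  intro x
  rw [normKey] at *
  rw [hmem x]
  simp [PySem.List.mem_sorted, PySem.Set.mem_ofList, pyFrozenset]

-- sorted-list facts driving the merge
theorem dropWhile_gt (b : List String) (bt : List (List String))
    (h : (b :: bt).Pairwise (· ≤ ·)) :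
    ∀ x ∈ bt.dropWhile (fun y => y == b), b < x := by
  intro x hx
  have hsub : (bt.dropWhile (fun y => y == b)).Sublist bt := List.dropWhile_sublist _
  have hbt : bt.Pairwise (· ≤ ·) := (List.pairwise_cons.mp h).2
  have hble : ∀ y ∈ bt, b ≤ y := (List.pairwise_cons.mp h).1
  cases hd : bt.dropWhile (fun y => y == b) with
  | nil => rw [hd] at hx; simp at hx
  | cons c t =>
    have hne : bt.dropWhile (fun y => y == b) ≠ [] := by rw [hd]; simp
    have hhead := List.head_dropWhile_not (fun y => y == b) hne
    have hcne : ¬ (c == b) = true := by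
      rw [show (bt.dropWhile (fun y => y == b)).head hne = c from by simp [hd]] at hhead
      simp [hhead]
    have hcb : c ≠ b := fun hcb => hcne (by simp [hcb])
    have hcmem : c ∈ bt := hsub.subset (by rw [hd]; simp)
    have hbc : b < c := lt_of_le_of_ne (hble c hcmem) (Ne.symm hcb)
    rw [hd] at hx
    rcases List.mem_cons.mp hx with rfl | hx
    · exact hbc
    · have hct : (c :: t).Pairwise (· ≤ ·) := by
        have := hbt.sublist hsub; rwa [hd] at this
      exact lt_of_lt_of_le hbc ((List.pairwise_cons.mp hct).1 x hx)

theorem mem_cons_iff_dropWhile (b : List String) (bt : List (List String))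
    (h : (b :: bt).Pairwise (· ≤ ·)) :
    ∀ x, x ∈ b :: bt ↔ x = b ∨ x ∈ bt.dropWhile (fun y => y == b) := by
  intro x
  constructor
  · intro hx
    rcases List.mem_cons.mp hx with rfl | hx
    · exact Or.inl rfl
    · rw [← List.takeWhile_append_dropWhile (p := fun y => y == b) (l := bt)] at hx
      rcases List.mem_append.mp hx with hx | hx
      · have := List.mem_takeWhile_imp hx
        simp at this; exact Or.inl this
      · exact Or.inr hx
  · rintro (rfl | hx)
    · simp
    · exact List.mem_cons_of_mem _ ((List.dropWhile_sublist _).subset hx)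

theorem pairwise_dropWhile (b : List String) (bt : List (List String))
    (h : (b :: bt).Pairwise (· ≤ ·)) :
    (bt.dropWhile (fun y => y == b)).Pairwise (· ≤ ·) :=
  ((List.pairwise_cons.mp h).2).sublist (List.dropWhile_sublist _)

theorem mergeLoop_spec (bk hk newAcc resAcc : List (List String))
    (hb : bk.Pairwise (· ≤ ·)) (hh : hk.Pairwise (· ≤ ·)) :
    ∃ N R, mergeLoop bk hk newAcc resAcc = (newAcc ++ N, resAcc ++ R)
      ∧ N.Pairwise (· < ·) ∧ R.Pairwise (· < ·)
      ∧ (∀ x, x ∈ N ↔ x ∈ hk ∧ x ∉ bk) ∧ (∀ x, x ∈ R ↔ x ∈ bk ∧ x ∉ hk) := by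
  revert hb hh
  induction bk, hk, newAcc, resAcc using mergeLoop.induct with
  | case1 newAcc resAcc =>
    intro hb hh
    exact ⟨[], [], by simp [mergeLoop], by simp, by simp, by simp, by simp⟩
  | case2 newAcc resAcc b bt ih =>
    intro hb hh
    obtain ⟨N, R, heq, hN, hR, hmN, hmR⟩ := ih (pairwise_dropWhile b bt hb) List.Pairwise.nil
    refine ⟨N, b :: R, ?_, hN, ?_, ?_, ?_⟩
    · rw [mergeLoop, heq]; simp
    · rw [List.pairwise_cons]
      exact ⟨fun x hx => dropWhile_gt b bt hb x ((hmR x).mp hx).1, hR⟩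
    · intro x; rw [hmN x]; simp
    · intro x
      rw [List.mem_cons, hmR x, mem_cons_iff_dropWhile b bt hb x]
      simp
  | case3 newAcc resAcc h ht ih =>
    intro hb hh
    obtain ⟨N, R, heq, hN, hR, hmN, hmR⟩ := ih List.Pairwise.nil (pairwise_dropWhile h ht hh)
    refine ⟨h :: N, R, ?_, ?_, hR, ?_, ?_⟩
    · rw [mergeLoop, heq]; simp
    · rw [List.pairwise_cons]
      exact ⟨fun x hx => dropWhile_gt h ht hh x ((hmN x).mp hx).1, hN⟩
    · intro x
      rw [List.mem_cons, hmN x, mem_cons_iff_dropWhile h ht hh x]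
      simp
    · intro x; rw [hmR x]; simp
  | case4 newAcc resAcc b bt h ht hlt ih =>
    intro hb hh
    obtain ⟨N, R, heq, hN, hR, hmN, hmR⟩ := ih (pairwise_dropWhile b bt hb) hh
    have hble : ∀ y ∈ h :: ht, h ≤ y := by
      intro y hy
      rcases List.mem_cons.mp hy with rfl | hy
      · exact le_rfl
      · exact (List.pairwise_cons.mp hh).1 y hy
    refine ⟨N, b :: R, ?_, hN, ?_, ?_, ?_⟩
    · rw [mergeLoop, if_pos hlt, heq]; simp
    · rw [List.pairwise_cons]
      exact ⟨fun x hx => dropWhile_gt b bt hb x ((hmR x).mp hx).1, hR⟩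
    · intro x
      rw [hmN x, mem_cons_iff_dropWhile b bt hb x]
      have hxb : x ∈ h :: ht → x ≠ b := by
        rintro h1 rfl
        exact absurd (lt_of_lt_of_le hlt (hble x h1)) (lt_irrefl x)
      tauto
    · intro x
      rw [List.mem_cons, hmR x, mem_cons_iff_dropWhile b bt hb x]
      have hxb : x = b → x ∉ h :: ht := by
        rintro rfl hmem
        exact absurd (lt_of_lt_of_le hlt (hble x hmem)) (lt_irrefl x)
      tauto
  | case5 newAcc resAcc b bt h ht hnlt hlt ih =>
    intro hb hh
    obtain ⟨N, R, heq, hN, hR, hmN, hmR⟩ := ih hb (pairwise_dropWhile h ht hh)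
    have hble : ∀ y ∈ b :: bt, b ≤ y := by
      intro y hy
      rcases List.mem_cons.mp hy with rfl | hy
      · exact le_rfl
      · exact (List.pairwise_cons.mp hb).1 y hy
    refine ⟨h :: N, R, ?_, ?_, hR, ?_, ?_⟩
    · rw [mergeLoop, if_neg hnlt, if_pos hlt, heq]; simp
    · rw [List.pairwise_cons]
      exact ⟨fun x hx => dropWhile_gt h ht hh x ((hmN x).mp hx).1, hN⟩
    · intro x
      rw [List.mem_cons, hmN x, mem_cons_iff_dropWhile h ht hh x]
      have hxb : x = h → x ∉ b :: bt := by
        rintro rfl hmem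
        exact absurd (lt_of_lt_of_le hlt (hble x hmem)) (lt_irrefl x)
      tauto
    · intro x
      rw [hmR x, mem_cons_iff_dropWhile h ht hh x]
      have hxb : x ∈ b :: bt → x ≠ h := by
        rintro h1 rfl
        exact absurd (lt_of_lt_of_le hlt (hble x h1)) (lt_irrefl x)
      tauto
  | case6 newAcc resAcc b bt h ht hnlt hnlt2 ih =>
    intro hb hh
    have hbh : b = h := le_antisymm (not_lt.mp hnlt2) (not_lt.mp hnlt)
    obtain ⟨N, R, heq, hN, hR, hmN, hmR⟩ := ih (pairwise_dropWhile b bt hb) (pairwise_dropWhile h ht hh)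
    have hiff : ∀ x : List String, (x = b) ↔ (x = h) := by intro x; rw [hbh]
    have hxb1 : ∀ x, x ∈ List.dropWhile (fun y => y == h) ht → ¬ x = h := by
      intro x h1 h2
      rw [h2] at h1
      exact lt_irrefl h (dropWhile_gt h ht hh h h1)
    have hxb2 : ∀ x, x ∈ List.dropWhile (fun y => y == b) bt → ¬ x = b := by
      intro x h1 h2
      rw [h2] at h1
      exact lt_irrefl b (dropWhile_gt b bt hb b h1)
    refine ⟨N, R, ?_, hN, hR, ?_, ?_⟩
    · rw [mergeLoop, if_neg hnlt, if_neg hnlt2, heq]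
    · intro x
      rw [hmN x, mem_cons_iff_dropWhile b bt hb x, mem_cons_iff_dropWhile h ht hh x]
      have h1 := hiff x
      have h2 := hxb1 x
      have h3 := hxb2 x
      tauto
    · intro x
      rw [hmR x, mem_cons_iff_dropWhile b bt hb x, mem_cons_iff_dropWhile h ht hh x]
      have h1 := hiff x
      have h2 := hxb1 x
      have h3 := hxb2 x
      tauto

-- sorted(c) is the identity on A's frozenset representatives
theorem innerSorted_id (l : List (List String)) (xs : List (List String))
    (hl : ∀ c ∈ l, c ∈ xs.map pyFrozenset) :
    l.map (fun c => PySem.List.sorted c (fun x => x) false) = l := by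
  rw [List.map_congr_left (g := id), List.map_id]
  intro c hc
  obtain ⟨a, _, rfl⟩ := List.mem_map.mp (hl c hc)
  simp only [pyFrozenset, id_eq]
  exact PySem.List.sorted_sorted _ _

-- ===== VERDICT =====
theorem diff_cycles_spec : Claim_equal_diff_cycles := by
  intro bs hs _
  unfold Spec_diff_cycles diff_cycles diff_cycles_alt
  have hkey : ∀ (l : List (List String)), l.map normKey = l.map pyFrozenset := by
    intro l; exact List.map_congr_left (fun c _ => normKey_eq_pyFrozenset c)
  rw [hkey bs, hkey hs]
  set bk := @PySem.List.sorted _ _ List.instLinearOrder.toLT LinearOrder.toDecidableLT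
    (bs.map pyFrozenset) (fun x => x) false with hbk
  set hk := @PySem.List.sorted _ _ List.instLinearOrder.toLT LinearOrder.toDecidableLT
    (hs.map pyFrozenset) (fun x => x) false with hhk
  have hbp : bk.Pairwise (· ≤ ·) := PySem.List.sorted_pairwise _ _
  have hhp : hk.Pairwise (· ≤ ·) := PySem.List.sorted_pairwise _ _
  obtain ⟨N, R, heq, hN, hR, hmN, hmR⟩ := mergeLoop_spec bk hk [] [] hbp hhp
  rw [heq]
  simp only [List.nil_append]
  have hmbk : ∀ x, x ∈ bk ↔ x ∈ bs.map pyFrozenset := by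
    intro x; rw [hbk]; exact @PySem.List.mem_sorted _ _ List.instLinearOrder.toLT LinearOrder.toDecidableLT _ _ _ _
  have hmhk : ∀ x, x ∈ hk ↔ x ∈ hs.map pyFrozenset := by
    intro x; rw [hhk]; exact @PySem.List.mem_sorted _ _ List.instLinearOrder.toLT LinearOrder.toDecidableLT _ _ _ _
  have hnodN : (PySem.Set.diff (PySem.Set.ofList (hs.map pyFrozenset)) (PySem.Set.ofList (bs.map pyFrozenset))).Nodup :=
    PySem.Set.nodup_diff _ _ (PySem.Set.nodup_ofList _)
  have hnodR : (PySem.Set.diff (PySem.Set.ofList (bs.map pyFrozenset)) (PySem.Set.ofList (hs.map pyFrozenset))).Nodup :=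
    PySem.Set.nodup_diff _ _ (PySem.Set.nodup_ofList _)
  rw [Prod.mk.injEq]
  constructor
  · rw [innerSorted_id _ hs (by
      intro c hc
      have := (PySem.Set.mem_diff _ _ _).mp hc
      exact (PySem.Set.mem_ofList _ _).mp this.1)]
    refine PySem.List.sorted_eq_of_perm_of_pairwise_lt _ N (fun x => x) ?_ hN
    refine (List.perm_ext_iff_of_nodup (hN.imp ne_of_lt) hnodN).mpr ?_
    intro x
    rw [hmN x, PySem.Set.mem_diff, PySem.Set.mem_ofList, PySem.Set.mem_ofList, hmhk x, hmbk x]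
  · rw [innerSorted_id _ bs (by
      intro c hc
      have := (PySem.Set.mem_diff _ _ _).mp hc
      exact (PySem.Set.mem_ofList _ _).mp this.1)]
    refine PySem.List.sorted_eq_of_perm_of_pairwise_lt _ R (fun x => x) ?_ hR
    refine (List.perm_ext_iff_of_nodup (hR.imp ne_of_lt) hnodR).mpr ?_
    intro x
    rw [hmR x, PySem.Set.mem_diff, PySem.Set.mem_ofList, PySem.Set.mem_ofList, hmbk x, hmhk x]
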